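-- pv_equiv track=rewrite | github.com/lexcesar/drmec-x | pages/home.py | _sanitize_code_input
-- ===== SOURCE A (Python) =====
-- def _sanitize_code_input(code: str) -> str:
--     """Escape ReAct control tokens in user code to mitigate prompt injection."""
--     dangerous_tokens = [
--         "Thought:", "Action:", "Action Input:", "Observation:",
--         "Final Answer:", "</USER_CODE>", "<USER_CODE>",
--     ]
--     sanitized = code
--     for token in dangerous_tokens:
--         sanitized = sanitized.replace(token, f"# {token}")
--     return sanitized
-- ===== SOURCE B (Python) =====
-- import re
--
-- # ReAct control tokens, longest first so that e.g. "Action Input:" is matched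
-- # before its shorter sibling "Action:" could be tried at the same position.
-- _TOKENS = [
--     "Action Input:", "Final Answer:", "Observation:", "</USER_CODE>",
--     "<USER_CODE>", "Thought:", "Action:",
-- ]
-- _PATTERN = re.compile("|".join(re.escape(t) for t in _TOKENS))
--
--
-- def _sanitize_code_input(code: str) -> str:
--     """Escape ReAct control tokens in user code to mitigate prompt injection."""
--     return _PATTERN.sub(lambda m: "# " + m.group(0), code)
-- ===== Notes on version B (the rewrite author's own statement) =====
-- stated objective: idiomatic
-- what changed: B replaces A's seven sequential full-string .replace passes with one precompiled regex alternation (tokens sorted longest-first, re.escape'd) applied in a single left-to-right re.sub scan that prepends the comment marker to each matched token.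
import Mathlib
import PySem

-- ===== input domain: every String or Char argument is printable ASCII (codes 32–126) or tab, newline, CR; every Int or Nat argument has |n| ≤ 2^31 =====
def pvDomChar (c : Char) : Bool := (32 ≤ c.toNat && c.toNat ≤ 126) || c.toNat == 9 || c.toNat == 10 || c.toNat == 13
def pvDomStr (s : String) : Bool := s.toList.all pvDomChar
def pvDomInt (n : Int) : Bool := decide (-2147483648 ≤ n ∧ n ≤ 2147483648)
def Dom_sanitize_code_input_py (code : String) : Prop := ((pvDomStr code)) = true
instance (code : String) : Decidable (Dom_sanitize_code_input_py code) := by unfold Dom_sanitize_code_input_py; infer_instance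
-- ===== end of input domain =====

-- B replaces A's seven sequential full-string replace passes with one single left-to-right
-- scan over the string (a regex alternation in Python, ported by hand below); same output.

-- ===== PORT A =====
def sanitize_code_input_py (code : String) : String :=
  let dangerous_tokens : List String :=
    ["Thought:", "Action:", "Action Input:", "Observation:",
     "Final Answer:", "</USER_CODE>", "<USER_CODE>"]
  dangerous_tokens.foldl (fun sanitized token => PySem.Str.replace sanitized token ("# " ++ token)) code

-- ===== PORT B =====
-- B's token list, longest first exactly as written in Source B's _TOKENS.
def pvToksB : List (List Char) :=
  ["Action Input:".toList, "Final Answer:".toList, "Observation:".toList,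
   "</USER_CODE>".toList, "<USER_CODE>".toList, "Thought:".toList, "Action:".toList]

-- first alternative of the pattern that matches at the current position (re tries them in order)
def pvFind (toks : List (List Char)) (s : List Char) : Option (List Char) :=
  toks.find? (fun t => t.isPrefixOf s)

-- _PATTERN.sub ported by hand (PySem has no regex): a single left-to-right scan; at each index
-- the escaped literal alternatives are tried in pattern order, a match is replaced by
-- '# ' ++ match and scanning resumes after it — exactly re.sub's semantics for this pattern.
-- Fuel = length of the remaining input; each step consumes at least one character.
def pvScanGo (toks : List (List Char)) : Nat → List Char → List Char
  | 0, l => l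
  | _ + 1, [] => []
  | f + 1, c :: t =>
    match pvFind toks (c :: t) with
    | some tok => '#' :: ' ' :: (tok ++ pvScanGo toks f (List.drop tok.length (c :: t)))
    | none => c :: pvScanGo toks f t

def sanitize_code_input_py_alt (code : String) : String :=
  String.ofList (pvScanGo pvToksB code.toList.length code.toList)

-- ===== PRECONDITION & SPEC =====
def Spec_sanitize_code_input_py (code : String) (out : String) : Prop := out = sanitize_code_input_py_alt code
instance (code : String) (out : String) : Decidable (Spec_sanitize_code_input_py code out) := by unfold Spec_sanitize_code_input_py; infer_instance

-- ===== CLAIM (what is proved, stated in full; the proofs are below) =====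
def Claim_equal_sanitize_code_input_py : Prop := ∀ (code : String), Dom_sanitize_code_input_py code → Spec_sanitize_code_input_py code (sanitize_code_input_py code)

-- ===== LEMMAS AND PROOFS =====

-- a prefix of an append is a prefix of the left part, or contains it
lemma pvPrefix_append_cases {u b r : List Char} (h : u <+: b ++ r) : u <+: b ∨ b <+: u := by
  rcases h with ⟨w, hw⟩
  rcases le_or_gt u.length b.length with hle | hlt
  · left
    have hu : u = List.take u.length (b ++ r) := by rw [← hw]; simp
    rw [List.take_append_of_le_length hle] at hu
    rw [hu]; exact List.take_prefix _ _
  · right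
    have hb : b = List.take b.length (u ++ w) := by rw [hw]; simp
    rw [List.take_append_of_le_length (le_of_lt hlt)] at hb
    rw [hb]; exact List.take_prefix _ _

-- the scan only depends on the fuel through `length ≤ fuel`
lemma pvScanGo_fuel (toks : List (List Char)) (htoks : ∀ t ∈ toks, t ≠ []) :
    ∀ f l, l.length ≤ f → pvScanGo toks f l = pvScanGo toks l.length l := by
  intro f
  induction f using Nat.strong_induction_on with
  | _ f IH =>
    intro l hl
    cases f with
    | zero =>
      have : l = [] := List.length_eq_zero_iff.mp (Nat.le_zero.mp hl)
      subst this; rfl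
    | succ f =>
      cases l with
      | nil => rfl
      | cons c t =>
      show pvScanGo toks (f+1) (c :: t) = pvScanGo toks (t.length + 1) (c :: t)
      have hl' : t.length ≤ f := by simpa using hl
      simp only [pvScanGo]
      cases hfind : pvFind toks (c :: t) with
      | none =>
        show c :: pvScanGo toks f t = c :: pvScanGo toks t.length t
        rw [IH f (Nat.lt_succ_self f) t hl']
      | some tok =>
        have hmem : tok ∈ toks := List.mem_of_find?_eq_some hfind
        have htok : tok ≠ [] := htoks tok hmem
        have hlen : 1 ≤ tok.length := by
          cases tok with
          | nil => exact absurd rfl htok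
          | cons a b => simp
        have hd : (List.drop tok.length (c :: t)).length ≤ t.length := by
          simp only [List.length_drop, List.length_cons]
          omega
        have e1 : pvScanGo toks f (List.drop tok.length (c :: t))
            = pvScanGo toks (List.drop tok.length (c :: t)).length (List.drop tok.length (c :: t)) :=
          IH f (Nat.lt_succ_self f) _ (le_trans hd (by simpa using hl))
        have e2 : pvScanGo toks t.length (List.drop tok.length (c :: t))
            = pvScanGo toks (List.drop tok.length (c :: t)).length (List.drop tok.length (c :: t)) :=
          IH t.length (by omega) _ hd
        show '#' :: ' ' :: (tok ++ pvScanGo toks f (List.drop tok.length (c :: t)))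
            = '#' :: ' ' :: (tok ++ pvScanGo toks t.length (List.drop tok.length (c :: t)))
        rw [e1, e2]

-- the fuel-free wrapper used by all proofs
def pvScan (toks : List (List Char)) (l : List Char) : List Char := pvScanGo toks l.length l

lemma pvScan_nil (toks : List (List Char)) : pvScan toks [] = [] := rfl

lemma pvScan_cons_some (toks : List (List Char)) (htoks : ∀ t ∈ toks, t ≠ [])
    {c : Char} {t tok : List Char} (h : pvFind toks (c :: t) = some tok) :
    pvScan toks (c :: t) = '#' :: ' ' :: (tok ++ pvScan toks (List.drop tok.length (c :: t))) := by
  have hmem : tok ∈ toks := List.mem_of_find?_eq_some h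
  have hlen : 1 ≤ tok.length := by
    cases tok with
    | nil => exact absurd rfl (htoks _ hmem)
    | cons a b => simp
  show pvScanGo toks (t.length + 1) (c :: t) = _
  simp only [pvScanGo, h]
  rw [pvScanGo_fuel toks htoks t.length (List.drop tok.length (c :: t))
    (by simp only [List.length_drop, List.length_cons]; omega)]
  rfl

lemma pvScan_cons_none (toks : List (List Char)) {c : Char} {t : List Char}
    (h : pvFind toks (c :: t) = none) :
    pvScan toks (c :: t) = c :: pvScan toks t := by
  show pvScanGo toks (t.length + 1) (c :: t) = _
  simp only [pvScanGo, h]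
  rfl

-- PySem.Chars.replace with replacement "# " ++ old IS the one-token scan
lemma pvReplace_go_eq (old : List Char) :
    ∀ f l acc, PySem.Chars.replace.go old ('#' :: ' ' :: old) f l acc
      = acc.reverse ++ pvScanGo [old] f l := by
  intro f
  induction f with
  | zero => intro l acc; simp [PySem.Chars.replace.go, pvScanGo]
  | succ f IH =>
    intro l acc
    cases l with
    | nil => simp [PySem.Chars.replace.go, pvScanGo]
    | cons c t =>
      by_cases hp : old.isPrefixOf (c :: t)
      · have hfind : pvFind [old] (c :: t) = some old := by
          simp [pvFind, List.find?, hp]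
        simp only [PySem.Chars.replace.go, hp, if_true, pvScanGo, hfind, IH]
        simp
      · have hfind : pvFind [old] (c :: t) = none := by
          simp [pvFind, List.find?, hp]
        simp only [PySem.Chars.replace.go, hp, pvScanGo, hfind, IH]
        simp

lemma pvReplace_eq_scan (old : List Char) (hold : old ≠ []) (s : List Char) :
    PySem.Chars.replace s old ('#' :: ' ' :: old) = pvScan [old] s := by
  have : old.isEmpty = false := by cases old <;> simp_all
  simp [PySem.Chars.replace, this, pvReplace_go_eq, pvScan]

-- the scan copies verbatim a block in which no token can start
lemma pvScan_passOver (toks : List (List Char)) :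
    ∀ (b r : List Char),
      (∀ V ∈ toks, ∀ j < b.length, ¬ V <+: b.drop j ∧ ¬ b.drop j <+: V) →
      pvScan toks (b ++ r) = b ++ pvScan toks r := by
  intro b
  induction b with
  | nil => intro r _; simp
  | cons c b' IH =>
    intro r h
    have hfind : pvFind toks (c :: (b' ++ r)) = none := by
      apply List.find?_eq_none.mpr
      intro V hV
      simp only [List.isPrefixOf_iff_prefix]
      intro hpre
      rcases pvPrefix_append_cases (b := c :: b') hpre with h1 | h1
      · exact (h V hV 0 (by simp)).1 h1
      · exact (h V hV 0 (by simp)).2 h1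
    rw [List.cons_append, pvScan_cons_none toks hfind,
      IH r (fun V hV j hj => by simpa using h V hV (j + 1) (by simpa using Nat.succ_lt_succ hj))]
    simp

-- scanning cannot create a new occurrence of a (suffix of a) foreign token at the front
lemma pvScan_noCreate (toks : List (List Char)) (htoks : ∀ t ∈ toks, t ≠ []) (U : List Char)
    (hc : ∀ V ∈ toks, ∀ k < U.length,
      ¬ U.drop k <+: ('#' :: ' ' :: V) ∧ ¬ ('#' :: ' ' :: V) <+: U.drop k) :
    ∀ s, ∀ k < U.length, ¬ U.drop k <+: s → ¬ U.drop k <+: pvScan toks s := by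
  intro s
  induction s with
  | nil => intro k hk h; simpa [pvScan_nil] using h
  | cons c t IH =>
    intro k hk h
    have hw : U.drop k ≠ [] := by
      simp only [ne_eq, List.drop_eq_nil_iff]
      omega
    cases hfind : pvFind toks (c :: t) with
    | some V =>
      have hV : V ∈ toks := List.mem_of_find?_eq_some hfind
      rw [pvScan_cons_some toks htoks hfind]
      intro hpre
      have : U.drop k <+: ('#' :: ' ' :: V) ++ pvScan toks (List.drop V.length (c :: t)) := by
        simpa using hpre
      rcases pvPrefix_append_cases this with h1 | h1
      · exact (hc V hV k hk).1 h1
      · exact (hc V hV k hk).2 h1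
    | none =>
      rw [pvScan_cons_none toks hfind]
      intro hpre
      cases hwcons : U.drop k with
      | nil => exact hw hwcons
      | cons x w' =>
        rw [hwcons] at hpre
        have hx : x = c := by
          rcases hpre with ⟨ww, hww⟩
          simpa using congrArg (fun l => l.head?) hww
        subst hx
        have hw' : w' <+: pvScan toks t := (List.prefix_cons_inj x).mp hpre
        have hdropsucc : U.drop (k + 1) = w' := by
          rw [List.drop_add_one_eq_tail_drop, hwcons]; rfl
        by_cases hk1 : k + 1 < U.length
        · have hnot : ¬ U.drop (k + 1) <+: t := by
            intro hcon
            apply h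
            rw [hwcons]
            exact List.cons_prefix_cons.mpr ⟨rfl, by rwa [hdropsucc] at hcon⟩
          exact IH (k + 1) hk1 hnot (by rwa [hdropsucc])
        · -- then w' = [], i.e. U.drop k = [x], which IS a prefix of c :: t: contradiction with h
          have : w' = [] := by
            have : U.drop (k + 1) = [] := by
              simp only [List.drop_eq_nil_iff]; omega
            rwa [hdropsucc] at this
          subst this
          exact h (by rw [hwcons]; exact List.cons_prefix_cons.mpr ⟨rfl, List.nil_prefix⟩)

-- MAIN FUSION: running the one-token scan for U after the multi-token scan for toks
-- is the multi-token scan for toks ++ [U]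
lemma pvScan_fusion (toks : List (List Char)) (U : List Char)
    (htoks : ∀ t ∈ toks, t ≠ []) (hU : U ≠ [])
    (h1 : ∀ V ∈ toks, ∀ j < ('#' :: ' ' :: V).length,
        ¬ U <+: ('#' :: ' ' :: V).drop j ∧ ¬ ('#' :: ' ' :: V).drop j <+: U)
    (h2 : ∀ V ∈ toks, ∀ j < U.length, ¬ V <+: U.drop j ∧ ¬ U.drop j <+: V)
    (h3 : ∀ V ∈ toks, ∀ k < U.length,
        ¬ U.drop k <+: ('#' :: ' ' :: V) ∧ ¬ ('#' :: ' ' :: V) <+: U.drop k) :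
    ∀ s, pvScan [U] (pvScan toks s) = pvScan (toks ++ [U]) s := by
  have htoks' : ∀ t ∈ toks ++ [U], t ≠ [] := by
    intro t ht
    rcases List.mem_append.mp ht with h | h
    · exact htoks t h
    · simp only [List.mem_singleton] at h; subst h; exact hU
  have hUone : ∀ t ∈ [U], t ≠ [] := by
    intro t ht; simp only [List.mem_singleton] at ht; subst ht; exact hU
  have main : ∀ n, ∀ s : List Char, s.length ≤ n →
      pvScan [U] (pvScan toks s) = pvScan (toks ++ [U]) s := by
    intro n
    induction n with
    | zero =>
      intro s hs
      have : s = [] := List.length_eq_zero_iff.mp (Nat.le_zero.mp hs)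
      subst this; rfl
    | succ n IH =>
      intro s hs
      cases s with
      | nil => rfl
      | cons c t =>
        have hs' : t.length ≤ n := by simpa using hs
        cases hfind : pvFind toks (c :: t) with
        | some V =>
          have hV : V ∈ toks := List.mem_of_find?_eq_some hfind
          have hVne : V ≠ [] := htoks V hV
          have hVlen : 1 ≤ V.length := by
            cases V with
            | nil => exact absurd rfl hVne
            | cons a b => simp
          have hfind' : pvFind (toks ++ [U]) (c :: t) = some V := by
            simp only [pvFind, List.find?_append]
            simp only [pvFind] at hfind
            rw [hfind]; rfl
          rw [pvScan_cons_some toks htoks hfind, pvScan_cons_some (toks ++ [U]) htoks' hfind']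
          have hblock : pvScan [U] ('#' :: ' ' :: (V ++ pvScan toks (List.drop V.length (c :: t))))
              = ('#' :: ' ' :: V) ++ pvScan [U] (pvScan toks (List.drop V.length (c :: t))) := by
            have := pvScan_passOver [U] ('#' :: ' ' :: V)
              (pvScan toks (List.drop V.length (c :: t))) ?_
            · simpa using this
            · intro W hW j hj
              simp only [List.mem_singleton] at hW; subst hW
              exact h1 V hV j hj
          rw [hblock, IH _ (by simp only [List.length_drop, List.length_cons]; omega)]
          simp
        | none =>
          by_cases hUp : U <+: (c :: t)
          · -- U fires here
            have hfind' : pvFind (toks ++ [U]) (c :: t) = some U := by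
              simp only [pvFind, List.find?_append]
              simp only [pvFind] at hfind
              rw [hfind]
              have hb : U.isPrefixOf (c :: t) = true := List.isPrefixOf_iff_prefix.mpr hUp
              simp [List.find?, hb]
            have hUlen : 1 ≤ U.length := by
              cases U with
              | nil => exact absurd rfl hU
              | cons a b => simp
            have hsplit : (c :: t) = U ++ List.drop U.length (c :: t) := by
              rcases hUp with ⟨w, hw⟩
              rw [← hw]; simp
            rw [pvScan_cons_some (toks ++ [U]) htoks' hfind']
            -- left side: scan toks passes over U, then the [U]-scan fires at the front
            have hpass : pvScan toks (c :: t)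
                = U ++ pvScan toks (List.drop U.length (c :: t)) := by
              conv_lhs => rw [hsplit]
              exact pvScan_passOver toks U _ (fun V hV j hj => h2 V hV j hj)
            rw [hpass]
            have hfindU : pvFind [U] (U ++ pvScan toks (List.drop U.length (c :: t))) = some U := by
              have hb : U.isPrefixOf (U ++ pvScan toks (List.drop U.length (c :: t))) = true :=
                List.isPrefixOf_iff_prefix.mpr (List.prefix_append _ _)
              simp [pvFind, List.find?, hb]
            obtain ⟨u0, U', hUc⟩ : ∃ u0 U', U = u0 :: U' := by
              cases U with
              | nil => exact absurd rfl hU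
              | cons a b => exact ⟨a, b, rfl⟩
            have hcons : U ++ pvScan toks (List.drop U.length (c :: t))
                = u0 :: (U' ++ pvScan toks (List.drop U.length (c :: t))) := by rw [hUc]; rfl
            have hfindU' : pvFind [U] (u0 :: (U' ++ pvScan toks (List.drop U.length (c :: t)))) = some U := by
              rw [← hcons]; exact hfindU
            rw [hcons, pvScan_cons_some [U] hUone hfindU', ← hcons, List.drop_left,
              IH _ (by simp only [List.length_drop, List.length_cons]; omega)]
          · -- nothing fires here
            have hfind' : pvFind (toks ++ [U]) (c :: t) = none := by
              simp only [pvFind, List.find?_append]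
              simp only [pvFind] at hfind
              rw [hfind]
              have hb : U.isPrefixOf (c :: t) = false := by
                rw [← Bool.not_eq_true]; simp [List.isPrefixOf_iff_prefix, hUp]
              simp [List.find?, hb]
            rw [pvScan_cons_none toks hfind, pvScan_cons_none (toks ++ [U]) hfind']
            have hnogen : ¬ U <+: pvScan toks (c :: t) := by
              have := pvScan_noCreate toks htoks U h3 (c :: t) 0
                (by cases U with | nil => exact absurd rfl hU | cons a b => simp)
              simpa using this hUp
            rw [pvScan_cons_none toks hfind] at hnogen
            have hfindU : pvFind [U] (c :: pvScan toks t) = none := by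
              have hb : U.isPrefixOf (c :: pvScan toks t) = false := by
                rw [← Bool.not_eq_true]; simp [List.isPrefixOf_iff_prefix, hnogen]
              simp [pvFind, List.find?, hb]
            rw [pvScan_cons_none [U] hfindU, IH t hs']
  intro s
  exact main s.length s le_rfl

-- with at most one token able to match at a position, the alternative order is irrelevant
lemma pvFind_order (l1 l2 : List (List Char)) (hperm : l1.Perm l2)
    (huniq : ∀ a ∈ l1, ∀ b ∈ l1, a ≠ b → ¬ a <+: b) :
    ∀ s, pvFind l1 s = pvFind l2 s := by
  intro s
  cases h : pvFind l1 s with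
  | none =>
    have hall := List.find?_eq_none.mp h
    symm
    apply List.find?_eq_none.mpr
    intro x hx
    exact hall x (hperm.mem_iff.mpr hx)
  | some a =>
    have ha : a ∈ l1 := List.mem_of_find?_eq_some h
    have hpa0 := List.find?_some (show List.find? (fun t => t.isPrefixOf s) l1 = some a from h)
    have hpa : a.isPrefixOf s = true := by simpa using hpa0
    cases h2 : pvFind l2 s with
    | none =>
      exact absurd hpa (by simpa using List.find?_eq_none.mp h2 a (hperm.mem_iff.mp ha))
    | some b =>
      have hb : b ∈ l1 := hperm.mem_iff.mpr (List.mem_of_find?_eq_some h2)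
      have hpb0 := List.find?_some (show List.find? (fun t => t.isPrefixOf s) l2 = some b from h2)
      have hpb : b.isPrefixOf s = true := by simpa using hpb0
      by_cases hab : a = b
      · rw [hab]
      · exfalso
        rcases List.prefix_or_prefix_of_prefix (List.isPrefixOf_iff_prefix.mp hpa)
          (List.isPrefixOf_iff_prefix.mp hpb) with hc | hc
        · exact huniq a ha b hb hab hc
        · exact huniq b hb a ha (Ne.symm hab) hc

lemma pvScan_order (l1 l2 : List (List Char)) (hperm : l1.Perm l2)
    (htoks : ∀ t ∈ l1, t ≠ [])
    (huniq : ∀ a ∈ l1, ∀ b ∈ l1, a ≠ b → ¬ a <+: b) :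
    ∀ s, pvScan l1 s = pvScan l2 s := by
  have htoks2 : ∀ t ∈ l2, t ≠ [] := fun t ht => htoks t (hperm.mem_iff.mpr ht)
  have main : ∀ n, ∀ s : List Char, s.length ≤ n → pvScan l1 s = pvScan l2 s := by
    intro n
    induction n with
    | zero =>
      intro s hs
      have : s = [] := List.length_eq_zero_iff.mp (Nat.le_zero.mp hs)
      subst this; rfl
    | succ n IH =>
      intro s hs
      cases s with
      | nil => rfl
      | cons c t =>
        have hs' : t.length ≤ n := by simpa using hs
        cases hfind : pvFind l1 (c :: t) with
        | some tok =>
          have hfind2 : pvFind l2 (c :: t) = some tok := by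
            rw [← pvFind_order l1 l2 hperm huniq]; exact hfind
          have htok : tok ≠ [] := htoks tok (List.mem_of_find?_eq_some hfind)
          have hlen : 1 ≤ tok.length := by
            cases tok with
            | nil => exact absurd rfl htok
            | cons a b => simp
          rw [pvScan_cons_some l1 htoks hfind, pvScan_cons_some l2 htoks2 hfind2,
            IH _ (by simp only [List.length_drop, List.length_cons]; omega)]
        | none =>
          have hfind2 : pvFind l2 (c :: t) = none := by
            rw [← pvFind_order l1 l2 hperm huniq]; exact hfind
          rw [pvScan_cons_none l1 hfind, pvScan_cons_none l2 hfind2,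
            IH t hs']
  intro s
  exact main s.length s le_rfl

-- A's token list, on the char-list side, assembled left to right into B's single scan
lemma pvListChain (l : List Char) :
    PySem.Chars.replace (PySem.Chars.replace (PySem.Chars.replace (PySem.Chars.replace (PySem.Chars.replace (PySem.Chars.replace (PySem.Chars.replace l
      "Thought:".toList ('#' :: ' ' :: "Thought:".toList))
      "Action:".toList ('#' :: ' ' :: "Action:".toList))
      "Action Input:".toList ('#' :: ' ' :: "Action Input:".toList))
      "Observation:".toList ('#' :: ' ' :: "Observation:".toList))
      "Final Answer:".toList ('#' :: ' ' :: "Final Answer:".toList))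
      "</USER_CODE>".toList ('#' :: ' ' :: "</USER_CODE>".toList))
      "<USER_CODE>".toList ('#' :: ' ' :: "<USER_CODE>".toList)
    = pvScan pvToksB l := by
  rw [pvReplace_eq_scan _ (by decide), pvReplace_eq_scan _ (by decide),
    pvReplace_eq_scan _ (by decide), pvReplace_eq_scan _ (by decide),
    pvReplace_eq_scan _ (by decide), pvReplace_eq_scan _ (by decide),
    pvReplace_eq_scan _ (by decide)]
  rw [pvScan_fusion ["Thought:".toList] "Action:".toList
    (by decide) (by decide) (by decide) (by decide) (by decide)]
  rw [pvScan_fusion (["Thought:".toList] ++ ["Action:".toList]) "Action Input:".toList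
    (by decide) (by decide) (by decide) (by decide) (by decide)]
  rw [pvScan_fusion ((["Thought:".toList] ++ ["Action:".toList]) ++ ["Action Input:".toList]) "Observation:".toList
    (by decide) (by decide) (by decide) (by decide) (by decide)]
  rw [pvScan_fusion (((["Thought:".toList] ++ ["Action:".toList]) ++ ["Action Input:".toList]) ++ ["Observation:".toList]) "Final Answer:".toList
    (by decide) (by decide) (by decide) (by decide) (by decide)]
  rw [pvScan_fusion ((((["Thought:".toList] ++ ["Action:".toList]) ++ ["Action Input:".toList]) ++ ["Observation:".toList]) ++ ["Final Answer:".toList]) "</USER_CODE>".toList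
    (by decide) (by decide) (by decide) (by decide) (by decide)]
  rw [pvScan_fusion (((((["Thought:".toList] ++ ["Action:".toList]) ++ ["Action Input:".toList]) ++ ["Observation:".toList]) ++ ["Final Answer:".toList]) ++ ["</USER_CODE>".toList]) "<USER_CODE>".toList
    (by decide) (by decide) (by decide) (by decide) (by decide)]
  exact pvScan_order _ pvToksB (by decide) (by decide) (by decide) l

-- ===== VERDICT (by name: the statement is the Claim_ definition above) =====
theorem sanitize_code_input_py_spec : Claim_equal_sanitize_code_input_py := by
  intro code _
  unfold Spec_sanitize_code_input_py
  have hhash : ("# " : String).toList = ['#', ' '] := rfl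
  simp only [sanitize_code_input_py, sanitize_code_input_py_alt, List.foldl,
    PySem.Str.replace, String.toList_ofList, String.toList_append, hhash,
    List.cons_append, List.nil_append]
  rw [pvListChain code.toList]
  rfl
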